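-- pv_equiv track=rewrite | github.com/pypi-data/pypi-mirror-344 | packages/voyllect/voyllect-0.1.28-py3-none-any.whl/voyllect/aggregate.py | select_elements_with_keywords
-- ===== SOURCE A (Python) =====
-- def select_elements_with_keywords(dicts,
--                                   keys,
--                                   keywords):
--     """Selects elements from a list of dictionaries if
--     a specific key contains a specific word.
--
--     Args:
--         dicts (list[dict]): A list of dictionaries.
--         keys (list): List of keys to check for the keyword.
--         keywords (list): List of words to look for in the value of the key.
--
--     Returns:
--         list[dict], List of dictionaries with elements selected based on the
--                     presence of the keywords.
--     """
--
--     results = []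
--     for d in dicts:
--         keep = False
--         for key in keys:
--             if key not in d:
--                 continue
--             value = str(d[key]).lower().strip()
--             for keyword in keywords:
--                 if str(keyword).lower().strip() in value:
--                     keep = True
--                     break
--             if keep:
--                 break
--         if keep:
--             results.append(d)
--
--     return results
-- ===== SOURCE B (Python) =====
-- def select_elements_with_keywords(dicts,
--                                   keys,
--                                   keywords):
--     """Hash-index the requested keys once and scan each dict's own items
--     instead of scanning the whole keys list per dict; keywords are
--     normalized once up front."""
--     keyset = set(keys)
--     kws = [str(kw).lower().strip() for kw in keywords]
--     return [d for d in dicts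
--             if any(k in keyset and
--                    any(kw in str(v).lower().strip() for kw in kws)
--                    for k, v in d.items())]
-- ===== Notes on version B (the rewrite author's own statement) =====
-- stated objective: alternative
-- what changed: B builds a hash set over the requested keys once and scans each dict's own items against it, removing A's inner scan of the whole keys list per dict; keywords are normalized once up front instead of once per (dict, key) pair. Pre_ only excludes Lean-side association lists with duplicate keys, which represent no Python dict.
import Mathlib
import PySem

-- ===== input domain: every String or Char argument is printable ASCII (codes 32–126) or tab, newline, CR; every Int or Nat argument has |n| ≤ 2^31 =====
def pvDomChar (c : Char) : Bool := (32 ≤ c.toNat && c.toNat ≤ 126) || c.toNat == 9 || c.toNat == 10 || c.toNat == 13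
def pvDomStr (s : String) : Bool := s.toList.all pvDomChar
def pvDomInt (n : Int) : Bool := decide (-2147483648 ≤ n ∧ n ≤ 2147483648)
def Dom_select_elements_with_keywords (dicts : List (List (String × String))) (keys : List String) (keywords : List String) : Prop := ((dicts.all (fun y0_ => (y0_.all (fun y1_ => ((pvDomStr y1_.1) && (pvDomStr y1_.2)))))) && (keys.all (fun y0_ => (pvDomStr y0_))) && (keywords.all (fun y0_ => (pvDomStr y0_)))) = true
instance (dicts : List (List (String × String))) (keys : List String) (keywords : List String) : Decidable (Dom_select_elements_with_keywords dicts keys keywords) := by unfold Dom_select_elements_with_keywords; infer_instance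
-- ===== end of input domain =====

-- B hash-indexes the requested keys once and scans each dict's OWN items, removing
-- A's inner scan of the whole keys list per dict; keywords are normalized once.

-- ===== PORT A =====
-- the outer 'keep' loop over keys with its 'break's, as a flag fold; values are strings,
-- so Python's str(...) is the identity here
def selA_keep (keys : List String) (keywords : List String) (d : List (String × String)) : Bool :=
  keys.foldl (fun keep key =>
    if keep then keep
    else
      match (PySem.Dict.mk d).get? key with
      | none => keep                                  -- 'if key not in d: continue'
      | some v =>
        let value := PySem.Str.strip (PySem.Str.lower v)
        keywords.foldl (fun keep kw =>
          if keep then keep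
          else if PySem.Str.isIn (PySem.Str.strip (PySem.Str.lower kw)) value then true
          else keep) keep) false

def select_elements_with_keywords (dicts : List (List (String × String))) (keys : List String) (keywords : List String) : List (List (String × String)) :=
  dicts.foldl (fun results d =>
    if selA_keep keys keywords d then results ++ [d] else results) []

-- ===== PORT B =====
-- str(x).lower().strip() for the string x
def selB_norm (s : String) : String := PySem.Str.strip (PySem.Str.lower s)

def select_elements_with_keywords_alt (dicts : List (List (String × String))) (keys : List String) (keywords : List String) : List (List (String × String)) :=
  let keyset := PySem.Set.ofList keys                 -- keyset = set(keys)
  let kws := keywords.map selB_norm                   -- normalized once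
  dicts.filter (fun d =>
    -- 'for k, v in d.items()': under Pre_ (unique keys) the association list IS d.items()
    d.any (fun kv =>
      keyset.contains kv.1 &&
      kws.any (fun kw => PySem.Str.isIn kw (selB_norm kv.2))))

-- ===== PRECONDITION & SPEC =====
-- Pre_ excludes association lists containing duplicate keys: those do not represent any
-- Python dict (dict keys are unique), so no Python input is excluded by it.
def Pre_select_elements_with_keywords (dicts : List (List (String × String))) (keys : List String) (keywords : List String) : Prop :=
  ∀ d ∈ dicts, (d.map Prod.fst).Nodup
instance (dicts : List (List (String × String))) (keys : List String) (keywords : List String) : Decidable (Pre_select_elements_with_keywords dicts keys keywords) := by unfold Pre_select_elements_with_keywords; infer_instance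

def pvWitness_select_elements_with_keywords : (List (List (String × String))) × List String × List String :=
  ([[("name", "Red Apple"), ("id", "1")], [("name", "pear")]], ["name"], ["apple"])

def Spec_select_elements_with_keywords (dicts : List (List (String × String))) (keys : List String) (keywords : List String) (out : List (List (String × String))) : Prop := out = select_elements_with_keywords_alt dicts keys keywords
instance (dicts : List (List (String × String))) (keys : List String) (keywords : List String) (out : List (List (String × String))) : Decidable (Spec_select_elements_with_keywords dicts keys keywords out) := by unfold Spec_select_elements_with_keywords; infer_instance

-- ===== CLAIM =====
def Claim_equal_select_elements_with_keywords : Prop := ∀ (dicts : List (List (String × String))) (keys : List String) (keywords : List String), Dom_select_elements_with_keywords dicts keys keywords → Pre_select_elements_with_keywords dicts keys keywords → Spec_select_elements_with_keywords dicts keys keywords (select_elements_with_keywords dicts keys keywords)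

-- ===== LEMMAS AND PROOFS =====

-- a flag fold with early exit ('if keep: break') is an any()
theorem flag_foldl_eq_any {α : Type} (f : Bool → α → Bool) (hf : ∀ x, f true x = true)
    (l : List α) (b : Bool) : l.foldl f b = (b || l.any (fun x => f false x)) := by
  induction l generalizing b with
  | nil => simp
  | cons x t ih =>
    simp only [List.foldl_cons, List.any_cons]
    cases b with
    | true => simp [hf x, ih true]
    | false => simp [ih (f false x)]

-- A's keep flag, characterised: some present key's normalized value contains some normalized keyword
theorem keepA_eq (keys keywords : List String) (d : List (String × String)) :
    selA_keep keys keywords d =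
      keys.any (fun k =>
        match (PySem.Dict.mk d).get? k with
        | some v => keywords.any
            (fun kw => PySem.Str.isIn (PySem.Str.strip (PySem.Str.lower kw))
                         (PySem.Str.strip (PySem.Str.lower v)))
        | none => false) := by
  unfold selA_keep
  rw [flag_foldl_eq_any _ (fun x => rfl)]
  simp only [Bool.false_or]
  refine congrArg _ (funext fun key => ?_)
  cases (PySem.Dict.mk d).get? key with
  | none => rfl
  | some v =>
    simp only
    rw [flag_foldl_eq_any _ (fun x => rfl)]
    simp

-- B's per-dict predicate (scan of d's items against the key set) equals A's keep flag
-- (scan of keys with a first-match lookup), provided d's keys are unique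
theorem pred_eq (keys keywords : List String) (d : List (String × String))
    (hnd : (d.map Prod.fst).Nodup) :
    (d.any (fun kv =>
      (PySem.Set.ofList keys).contains kv.1 &&
      (keywords.map selB_norm).any (fun kw => PySem.Str.isIn kw (selB_norm kv.2))))
    = selA_keep keys keywords d := by
  rw [keepA_eq, Bool.eq_iff_iff]
  simp only [List.any_eq_true, Bool.and_eq_true, List.any_map, PySem.Set.contains_iff,
    PySem.Set.mem_ofList, selB_norm, Function.comp_def]
  constructor
  · rintro ⟨⟨k, v⟩, hkv, hks, hq⟩
    refine ⟨k, hks, ?_⟩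
    have hget : (PySem.Dict.mk d).get? k = some v :=
      PySem.Dict.get?_of_mem_items (PySem.Dict.mk d) (by simpa [PySem.Dict.mk] using hkv)
        (by simpa [PySem.Dict.keys_mk] using hnd)
    simpa [hget] using hq
  · rintro ⟨k, hk, hmatch⟩
    cases hg : (PySem.Dict.mk d).get? k with
    | none => simp [hg] at hmatch
    | some v =>
      rw [hg] at hmatch
      simp only [List.any_eq_true] at hmatch
      exact ⟨(k, v), by simpa [PySem.Dict.mk] using
        PySem.Dict.mem_items_of_get?_eq_some (PySem.Dict.mk d) hg, hk, hmatch⟩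

-- ===== VERDICT =====
theorem select_elements_with_keywords_spec : Claim_equal_select_elements_with_keywords := by
  intro dicts keys keywords _ hpre
  unfold Spec_select_elements_with_keywords select_elements_with_keywords select_elements_with_keywords_alt
  rw [PySem.List.foldl_append_if_eq_filter]
  simp only [List.nil_append]
  exact List.filter_congr (fun d hd => (pred_eq keys keywords d (hpre d hd)).symm)
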